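-- pv_equiv track=rewrite | github.com/tmyoda/pfn-intern-2020 | q1/q1_solver.py | solve
-- ===== SOURCE A (Python) =====
-- import itertools
-- import math
--
-- def permutation(n, r):
--     return math.factorial(n) // math.factorial(n - r)
--
-- def det_3x3(A):
--     x_vec, y_vec, z_vec = A[0], A[1], A[2]
--     det = (x_vec[0] * y_vec[1] * z_vec[2]) \
--         + (x_vec[1] * y_vec[2] * z_vec[0]) \
--         + (x_vec[2] * y_vec[0] * z_vec[1]) \
--         - (x_vec[0] * y_vec[2] * z_vec[1]) \
--         - (x_vec[1] * y_vec[0] * z_vec[2]) \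
--         - (x_vec[2] * y_vec[1] * z_vec[0])
--
--     return det
--
-- def solve(x, y, d):
--     vec3_list = []
--     counter = 0
--     # 8通り作成
--     for i in range(2 ** 3):
--         b_str = bin(i)[2:].zfill(3)
--         num_list = list(map(lambda b_value: x if b_value == '0' else y, b_str))
--         vec3_list.append(num_list)
--
--     # 56通り重複なし選ぶ
--     choose_list = list(itertools.combinations(vec3_list, 3))
--
--     for mat in choose_list:
--         det = det_3x3(mat)
--
--         if(abs(det) == abs(d)):
--             counter += 3
--
--     if(d == 0):
--         # 0は符号関係ないので倍にする
--         counter *= 2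
--         # ベクトルが同じ向きの選ばれ方 ＝ 総数 - Permutaition
--         counter += 2 ** (3 * 3) - permutation(2 ** 3, 3)
--
--     return counter
-- ===== SOURCE B (Python) =====
-- import itertools
--
-- def solve(x, y, d):
--     # Enumerate all 512 ordered 3x3 matrices with rows from {x,y}^3 and
--     # count those whose determinant equals d exactly (cofactor expansion).
--     vecs = list(itertools.product([x, y], repeat=3))
--     count = 0
--     for a, b, c in itertools.product(vecs, repeat=3):
--         det = (a[0] * (b[1] * c[2] - b[2] * c[1])
--              - a[1] * (b[0] * c[2] - b[2] * c[0])
--              + a[2] * (b[0] * c[1] - b[1] * c[0]))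
--         if det == d:
--             count += 1
--     return count
-- ===== Notes on version B (the rewrite author's own statement) =====
-- stated objective: simpler
-- what changed: B drops A's combinations-with-multiplicity-3 scan over |det| and its special d==0 doubling/permutation patch, instead counting det==d directly over all 512 ordered row triples, which gives exactly 3 matches per distinct-row combination (even split of signs over the 6 row orders) plus the 176 repeated-row matrices precisely when d==0.
import Mathlib
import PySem

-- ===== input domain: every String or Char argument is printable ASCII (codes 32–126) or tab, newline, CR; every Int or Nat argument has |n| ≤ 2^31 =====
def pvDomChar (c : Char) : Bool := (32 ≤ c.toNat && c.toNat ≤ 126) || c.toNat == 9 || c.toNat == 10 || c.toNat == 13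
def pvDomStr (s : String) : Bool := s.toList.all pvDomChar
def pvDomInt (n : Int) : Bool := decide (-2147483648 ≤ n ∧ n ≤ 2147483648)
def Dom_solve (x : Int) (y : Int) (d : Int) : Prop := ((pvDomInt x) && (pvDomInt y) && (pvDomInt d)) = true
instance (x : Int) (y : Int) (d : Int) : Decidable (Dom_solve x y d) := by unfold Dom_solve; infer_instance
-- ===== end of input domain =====

-- B enumerates all 512 ordered row triples and counts det == d directly, replacing A's
-- 56-combination |det| scan with its ×3 multiplicity and special d == 0 patch (objective: simpler).

-- ===== PORT A =====
-- permutation(n, r) = n! // (n-r)!  (math.factorial ported via Nat.factorial; exact for the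
-- only call site n = 8, r = 3, where both arguments are nonnegative)
def permutationA (n r : Int) : Int :=
  PySem.Int.floordiv ((Nat.factorial n.toNat : Nat) : Int) ((Nat.factorial (n - r).toNat : Nat) : Int)

-- det_3x3(A); the tuple/list indexings A[0], x_vec[0], … are always in range (length-3 lists),
-- so pyGetD with a default is exact here
def det3x3A (m : List (List Int)) : Int :=
  let xv := PySem.List.pyGetD m 0 []
  let yv := PySem.List.pyGetD m 1 []
  let zv := PySem.List.pyGetD m 2 []
  (PySem.List.pyGetD xv 0 0) * (PySem.List.pyGetD yv 1 0) * (PySem.List.pyGetD zv 2 0)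
  + (PySem.List.pyGetD xv 1 0) * (PySem.List.pyGetD yv 2 0) * (PySem.List.pyGetD zv 0 0)
  + (PySem.List.pyGetD xv 2 0) * (PySem.List.pyGetD yv 0 0) * (PySem.List.pyGetD zv 1 0)
  - (PySem.List.pyGetD xv 0 0) * (PySem.List.pyGetD yv 2 0) * (PySem.List.pyGetD zv 1 0)
  - (PySem.List.pyGetD xv 1 0) * (PySem.List.pyGetD yv 0 0) * (PySem.List.pyGetD zv 2 0)
  - (PySem.List.pyGetD xv 2 0) * (PySem.List.pyGetD yv 1 0) * (PySem.List.pyGetD zv 0 0)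

def solve (x : Int) (y : Int) (d : Int) : Int :=
  -- for i in range(2**3): b_str = bin(i)[2:].zfill(3); vec3_list.append([x if b=='0' else y ...])
  let vec3_list : List (List Int) := (PySem.List.pyRange 0 (2 ^ 3) 1).foldl (fun acc i =>
    let b_str := PySem.Chars.zfill (PySem.List.slice (PySem.Int.toBinChars0b i) (some 2) none) 3
    let num_list := b_str.map (fun b_value => if b_value = '0' then x else y)
    acc ++ [num_list]) []
  -- choose_list = list(itertools.combinations(vec3_list, 3))
  let choose_list := PySem.List.combinations vec3_list 3
  let counter : Int := choose_list.foldl (fun counter mat =>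
    if |det3x3A mat| = |d| then counter + 3 else counter) 0
  if d = 0 then counter * 2 + (2 ^ (3 * 3) - permutationA (2 ^ 3) 3) else counter

-- ===== PORT B =====
-- cofactor expansion of the 3x3 determinant on a triple of row triples
def det3B (a b c : Int × Int × Int) : Int :=
  a.1 * (b.2.1 * c.2.2 - b.2.2 * c.2.1)
  - a.2.1 * (b.1 * c.2.2 - b.2.2 * c.1)
  + a.2.2 * (b.1 * c.2.1 - b.2.1 * c.1)

def solve_alt (x : Int) (y : Int) (d : Int) : Int :=
  -- vecs = list(itertools.product([x, y], repeat=3))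
  let vecs : List (Int × Int × Int) :=
    [x, y].flatMap (fun a => [x, y].flatMap (fun b => [x, y].map (fun c => (a, b, c))))
  -- for a, b, c in itertools.product(vecs, repeat=3): if det == d: count += 1
  (vecs.flatMap (fun a => vecs.flatMap (fun b => vecs.map (fun c => (a, b, c))))).foldl
    (fun count m => if det3B m.1 m.2.1 m.2.2 = d then count + 1 else count) 0

-- ===== PRECONDITION & SPEC =====
def Spec_solve (x : Int) (y : Int) (d : Int) (out : Int) : Prop := out = solve_alt x y d
instance (x : Int) (y : Int) (d : Int) (out : Int) : Decidable (Spec_solve x y d out) := by unfold Spec_solve; infer_instance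

-- ===== CLAIM (what is proved, stated in full; the proofs are below) =====
def Claim_equal_solve : Prop := ∀ (x : Int) (y : Int) (d : Int), Dom_solve x y d → Spec_solve x y d (solve x y d)

-- ===== LEMMAS AND PROOFS =====

-- 0/1 indicator as an Int
def ind (P : Prop) [Decidable P] : Int := if P then 1 else 0

-- A's determinant applied to three explicit rows
def qd (a b c : List Int) : Int := det3x3A [a, b, c]

-- the concrete list of 8 row vectors both programs build
def Lxy (x y : Int) : List (List Int) :=
  [[x,x,x],[x,x,y],[x,y,x],[x,y,y],[y,x,x],[y,x,y],[y,y,x],[y,y,y]]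

-- a row vector as the triple B uses
def tr (v : List Int) : Int × Int × Int :=
  (PySem.List.pyGetD v 0 0, PySem.List.pyGetD v 1 0, PySem.List.pyGetD v 2 0)

-- ordered-triple indicator sum (B's count, in sum form)
def T3 (d : Int) (As Bs Cs : List (List Int)) : Int :=
  (As.map (fun a => (Bs.map (fun b => (Cs.map (fun c => ind (qd a b c = d))).sum)).sum)).sum

-- signed combination sums (A's count, in sum form)
def M2 (d : Int) (v : List Int) (t : List (List Int)) : Int :=
  ((PySem.List.combinations t 2).map
    (fun m => ind (det3x3A (v :: m) = d) + ind (det3x3A (v :: m) = -d))).sum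

def M3 (d : Int) (ls : List (List Int)) : Int :=
  ((PySem.List.combinations ls 3).map
    (fun m => ind (det3x3A m = d) + ind (det3x3A m = -d))).sum

lemma qd_def (a b c : List Int) : qd a b c =
  (PySem.List.pyGetD a 0 0) * (PySem.List.pyGetD b 1 0) * (PySem.List.pyGetD c 2 0)
  + (PySem.List.pyGetD a 1 0) * (PySem.List.pyGetD b 2 0) * (PySem.List.pyGetD c 0 0)
  + (PySem.List.pyGetD a 2 0) * (PySem.List.pyGetD b 0 0) * (PySem.List.pyGetD c 1 0)
  - (PySem.List.pyGetD a 0 0) * (PySem.List.pyGetD b 2 0) * (PySem.List.pyGetD c 1 0)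
  - (PySem.List.pyGetD a 1 0) * (PySem.List.pyGetD b 0 0) * (PySem.List.pyGetD c 2 0)
  - (PySem.List.pyGetD a 2 0) * (PySem.List.pyGetD b 1 0) * (PySem.List.pyGetD c 0 0) := rfl

-- determinant identities (alternating multilinear form)
lemma qd_swap12 (a b c : List Int) : qd b a c = -qd a b c := by rw [qd_def, qd_def]; ring
lemma qd_cyc (a b c : List Int) : qd a b c = qd c a b := by rw [qd_def, qd_def]; ring
lemma qd_vvc (v c : List Int) : qd v v c = 0 := by rw [qd_def]; ring
lemma qd_vbv (v b : List Int) : qd v b v = 0 := by rw [qd_def]; ring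
lemma qd_avv (a v : List Int) : qd a v v = 0 := by rw [qd_def]; ring

lemma detBridge (a b c : List Int) : det3B (tr a) (tr b) (tr c) = qd a b c := by
  rw [qd_def]
  show PySem.List.pyGetD a 0 0 * (PySem.List.pyGetD b 1 0 * PySem.List.pyGetD c 2 0
      - PySem.List.pyGetD b 2 0 * PySem.List.pyGetD c 1 0)
    - PySem.List.pyGetD a 1 0 * (PySem.List.pyGetD b 0 0 * PySem.List.pyGetD c 2 0
      - PySem.List.pyGetD b 2 0 * PySem.List.pyGetD c 0 0)
    + PySem.List.pyGetD a 2 0 * (PySem.List.pyGetD b 0 0 * PySem.List.pyGetD c 1 0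
      - PySem.List.pyGetD b 1 0 * PySem.List.pyGetD c 0 0) = _
  ring

lemma ind_congr {P Q : Prop} [Decidable P] [Decidable Q] (h : P ↔ Q) : ind P = ind Q := by
  simp [ind, h]

lemma ind_zero_eq (d : Int) : ind ((0 : Int) = d) = ind (d = 0) := ind_congr (by omega)

-- scalar fact: pairing (b,c) with (c,b) turns the weighted indicators into 3·(ind(w=d)+ind(w=-d))
lemma pair_scalar (w d : Int) :
    (2 * ind (w = d) + ind (w = -d)) + (2 * ind (-w = d) + ind (-w = -d))
      = 3 * (ind (w = d) + ind (w = -d)) := by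
  simp only [ind]; split_ifs <;> omega

lemma diag_scalar (d : Int) :
    2 * ind ((0 : Int) = d) + ind ((0 : Int) = -d) = 3 * ind (d = 0) := by
  simp only [ind]; split_ifs <;> omega

-- L1: the one-v double sum over ordered pairs from t
lemma L1 (d : Int) (v : List Int) (t : List (List Int)) :
    (t.map (fun b => (t.map (fun c => 2 * ind (qd v b c = d) + ind (qd v b c = -d))).sum)).sum
      = 3 * t.length * ind (d = 0) + 3 * M2 d v t := by
  induction t with
  | nil => simp [M2, PySem.List.combinations_nil_succ]
  | cons b0 t' ih =>
    calc ((b0 :: t').map (fun b =>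
            ((b0 :: t').map (fun c => 2 * ind (qd v b c = d) + ind (qd v b c = -d))).sum)).sum
        = (2 * ind (qd v b0 b0 = d) + ind (qd v b0 b0 = -d))
          + (t'.map (fun c => 2 * ind (qd v b0 c = d) + ind (qd v b0 c = -d))).sum
          + ((t'.map (fun b => (2 * ind (qd v b b0 = d) + ind (qd v b b0 = -d)))).sum
             + (t'.map (fun b =>
                 (t'.map (fun c => 2 * ind (qd v b c = d) + ind (qd v b c = -d))).sum)).sum) := by
          simp only [List.map_cons, List.sum_cons, PySem.List.sum_map_add_int]
      _ = 3 * ind (d = 0)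
          + (t'.map (fun c => 3 * (ind (qd v b0 c = d) + ind (qd v b0 c = -d)))).sum
          + (3 * t'.length * ind (d = 0) + 3 * M2 d v t') := by
          rw [ih]
          have h1 : qd v b0 b0 = 0 := qd_avv v b0
          have hcomb : (t'.map (fun c => 2 * ind (qd v b0 c = d) + ind (qd v b0 c = -d))).sum
              + (t'.map (fun b => (2 * ind (qd v b b0 = d) + ind (qd v b b0 = -d)))).sum
              = (t'.map (fun c => 3 * (ind (qd v b0 c = d) + ind (qd v b0 c = -d)))).sum := by
            rw [← PySem.List.sum_map_add_int]
            refine congrArg List.sum (List.map_congr_left fun c _ => ?_)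
            have hswap : qd v c b0 = -qd v b0 c := by
              calc qd v c b0 = qd b0 v c := qd_cyc v c b0
                _ = -qd v b0 c := qd_swap12 v b0 c
            rw [hswap]
            exact pair_scalar (qd v b0 c) d
          rw [h1, diag_scalar]
          omega
      _ = 3 * (b0 :: t').length * ind (d = 0) + 3 * M2 d v (b0 :: t') := by
          have hM2 : M2 d v (b0 :: t')
              = (t'.map (fun c => ind (qd v b0 c = d) + ind (qd v b0 c = -d))).sum + M2 d v t' := by
            unfold M2
            rw [PySem.List.combinations_cons_succ, PySem.List.combinations_one]
            simp only [List.map_append, List.sum_append, List.map_map]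
            congr 1
          rw [hM2]
          rw [show (t'.map (fun c => 3 * (ind (qd v b0 c = d) + ind (qd v b0 c = -d)))).sum
              = 3 * (t'.map (fun c => ind (qd v b0 c = d) + ind (qd v b0 c = -d))).sum from
            List.sum_map_mul_left t' _ 3]
          push_cast [List.length_cons]
          ring

-- the cons split of the triple sum into its 8 head/tail pieces
lemma T3_cons (d : Int) (v : List Int) (t : List (List Int)) :
    T3 d (v :: t) (v :: t) (v :: t)
      = ind (qd v v v = d)
        + (t.map (fun c => ind (qd v v c = d))).sum
        + (t.map (fun b => ind (qd v b v = d))).sum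
        + (t.map (fun b => (t.map (fun c => ind (qd v b c = d))).sum)).sum
        + (t.map (fun a => ind (qd a v v = d))).sum
        + (t.map (fun a => (t.map (fun c => ind (qd a v c = d))).sum)).sum
        + (t.map (fun a => (t.map (fun b => ind (qd a b v = d))).sum)).sum
        + T3 d t t t := by
  unfold T3
  simp only [List.map_cons, List.sum_cons, PySem.List.sum_map_add_int]
  ring

-- constant sums from the equal-row identities
lemma sum_const_ind {f : List Int → Int} (t : List (List Int)) (h : ∀ a, f a = 0) (d : Int) :
    (t.map (fun a => ind (f a = d))).sum = t.length * ind (d = 0) := by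
  rw [show (t.map (fun a => ind (f a = d))) = t.map (fun _ => ind (d = 0)) from
    List.map_congr_left fun a _ => by rw [h a]; exact ind_zero_eq d]
  exact PySem.List.sum_map_const_int t _

-- main counting lemma: ordered triples vs 3-combinations
lemma mainT3 (d : Int) (ls : List (List Int)) :
    T3 d ls ls ls = 3 * M3 d ls + (3 * (ls.length : Int) ^ 2 - 2 * ls.length) * ind (d = 0) := by
  induction ls with
  | nil => simp [T3, M3, PySem.List.combinations_nil_succ]
  | cons v t ih =>
    rw [T3_cons, ih]
    have h1 : ind (qd v v v = d) = ind (d = 0) := by rw [qd_vvc]; exact ind_zero_eq d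
    have h2 := sum_const_ind t (qd_vvc v) d
    have h3 := sum_const_ind t (fun b => qd_vbv v b) d
    have h5 := sum_const_ind t (fun a => qd_avv a v) d
    -- P6: swap rows 1,2: qd a v c = -(qd v a c)
    have h6 : (t.map (fun a => (t.map (fun c => ind (qd a v c = d))).sum)).sum
        = (t.map (fun a => (t.map (fun c => ind (qd v a c = -d))).sum)).sum := by
      refine congrArg List.sum (List.map_congr_left fun a _ => ?_)
      refine congrArg List.sum (List.map_congr_left fun c _ => ?_)
      refine ind_congr ?_
      have := qd_swap12 v a c
      omega
    -- P7: cyclic: qd a b v = qd v a b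
    have h7 : (t.map (fun a => (t.map (fun b => ind (qd a b v = d))).sum)).sum
        = (t.map (fun a => (t.map (fun b => ind (qd v a b = d))).sum)).sum := by
      refine congrArg List.sum (List.map_congr_left fun a _ => ?_)
      refine congrArg List.sum (List.map_congr_left fun b _ => ?_)
      exact ind_congr (by rw [qd_cyc a b v])
    rw [h1, h2, h3, h5, h6, h7]
    -- combine the three remaining double sums via L1
    have hL1 := L1 d v t
    have hsum : (t.map (fun b => (t.map (fun c => ind (qd v b c = d))).sum)).sum
          + (t.map (fun a => (t.map (fun c => ind (qd v a c = -d))).sum)).sum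
          + (t.map (fun a => (t.map (fun b => ind (qd v a b = d))).sum)).sum
        = 3 * t.length * ind (d = 0) + 3 * M2 d v t := by
      rw [← hL1]
      rw [show (t.map (fun b => (t.map (fun c => 2 * ind (qd v b c = d) + ind (qd v b c = -d))).sum)).sum
          = (t.map (fun b => 2 * (t.map (fun c => ind (qd v b c = d))).sum
              + (t.map (fun c => ind (qd v b c = -d))).sum)).sum from
        congrArg List.sum (List.map_congr_left fun b _ => by
          rw [PySem.List.sum_map_add_int]
          rw [show (t.map (fun c => 2 * ind (qd v b c = d))).sum
              = 2 * (t.map (fun c => ind (qd v b c = d))).sum from List.sum_map_mul_left t _ 2])]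
      rw [PySem.List.sum_map_add_int]
      rw [show (t.map (fun b => 2 * (t.map (fun c => ind (qd v b c = d))).sum)).sum
          = 2 * (t.map (fun b => (t.map (fun c => ind (qd v b c = d))).sum)).sum from
        List.sum_map_mul_left t _ 2]
      ring
    have hM3 : M3 d (v :: t) = M2 d v t + M3 d t := by
      unfold M3 M2
      rw [PySem.List.combinations_cons_succ]
      simp only [List.map_append, List.sum_append, List.map_map]
      rfl
    rw [hM3]
    have : (t.map (fun b => (t.map (fun c => ind (qd v b c = d))).sum)).sum
          + (t.map (fun a => (t.map (fun c => ind (qd v a c = -d))).sum)).sum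
          + (t.map (fun a => (t.map (fun b => ind (qd v a b = d))).sum)).sum
        = 3 * t.length * ind (d = 0) + 3 * M2 d v t := hsum
    push_cast [List.length_cons]
    nlinarith [this]

-- A's accumulating loop adds 3 per matching combination
lemma foldl_if_add_three (p : List (List Int) → Prop) [DecidablePred p]
    (l : List (List (List Int))) (acc : Int) :
    l.foldl (fun counter mat => if p mat then counter + 3 else counter) acc
      = acc + 3 * (l.countP (fun m => decide (p m)) : Int) := by
  induction l generalizing acc with
  | nil => simp
  | cons m l ih =>
    simp only [List.foldl_cons, List.countP_cons]
    by_cases h : p m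
    · rw [if_pos h, ih]; simp only [h, decide_true, if_pos]; push_cast; ring
    · rw [if_neg h, ih]; simp [h]

-- a countP as an indicator sum
lemma countP_eq_sum_ind (p : List Int → List Int → List Int → Prop)
    [∀ a b c, Decidable (p a b c)] (l : List (List Int)) (a b : List Int) :
    ((l.countP (fun c => decide (p a b c)) : Nat) : Int)
      = (l.map (fun c => ind (p a b c))).sum := by
  rw [← PySem.List.sum_map_ite_one_zero (fun c => decide (p a b c)) l]
  exact congrArg List.sum (List.map_congr_left fun c _ => by simp [ind])

-- B's folded count equals the triple sum T3 over the untupled row list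
lemma solve_alt_eq_T3 (x y d : Int) : solve_alt x y d = T3 d (Lxy x y) (Lxy x y) (Lxy x y) := by
  unfold solve_alt
  rw [show [x, y].flatMap (fun a => [x, y].flatMap (fun b => [x, y].map (fun c => (a, b, c))))
      = (Lxy x y).map tr from rfl]
  rw [PySem.List.foldl_ite_add_one (fun m : (Int × Int × Int) × (Int × Int × Int) × Int × Int × Int
        => det3B m.1 m.2.1 m.2.2 = d)]
  rw [List.countP_flatMap]
  simp only [List.map_map, Function.comp_def, List.countP_flatMap, List.countP_map,
    Nat.cast_list_sum]
  rw [zero_add]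
  unfold T3
  refine congrArg List.sum (List.map_congr_left fun a _ => ?_)
  refine congrArg List.sum (List.map_congr_left fun b _ => ?_)
  rw [countP_eq_sum_ind (fun a b c => det3B (tr a) (tr b) (tr c) = d)]
  refine congrArg List.sum (List.map_congr_left fun c _ => ?_)
  exact ind_congr (by rw [detBridge])

-- M3 vs A's absolute-value count
lemma M3_eq_count_ne (d : Int) (hd : d ≠ 0) (ls : List (List Int)) :
    M3 d ls = ((PySem.List.combinations ls 3).countP (fun m => decide (|det3x3A m| = |d|)) : Nat) := by
  unfold M3
  rw [← PySem.List.sum_map_ite_one_zero (fun m => decide (|det3x3A m| = |d|))]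
  refine congrArg List.sum (List.map_congr_left fun m _ => ?_)
  have habs : (|det3x3A m| = |d|) = (det3x3A m = d ∨ det3x3A m = -d) := propext abs_eq_abs
  simp only [ind, decide_eq_true_eq, habs]
  split_ifs <;> omega

lemma M3_eq_count_zero (ls : List (List Int)) :
    M3 0 ls = 2 * ((PySem.List.combinations ls 3).countP (fun m => decide (|det3x3A m| = |0|)) : Nat) := by
  unfold M3
  rw [← PySem.List.sum_map_ite_one_zero (fun m => decide (|det3x3A m| = |0|)),
    ← List.sum_map_mul_left]
  refine congrArg List.sum (List.map_congr_left fun m _ => ?_)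
  have habs : (|det3x3A m| = |(0:Int)|) = (det3x3A m = 0 ∨ det3x3A m = -0) := propext abs_eq_abs
  simp only [ind, decide_eq_true_eq, habs]
  split_ifs <;> omega

-- A's vector-building loop produces exactly Lxy
lemma vecA_eq (x y : Int) :
    (PySem.List.pyRange 0 (2 ^ 3) 1).foldl (fun acc i =>
      let b_str := PySem.Chars.zfill (PySem.List.slice (PySem.Int.toBinChars0b i) (some 2) none) 3
      let num_list := b_str.map (fun b_value => if b_value = '0' then x else y)
      acc ++ [num_list]) [] = Lxy x y := rfl

lemma solve_eq (x y d : Int) :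
    solve x y d
      = (if d = 0
         then 3 * ((PySem.List.combinations (Lxy x y) 3).countP
                (fun m => decide (|det3x3A m| = |d|)) : Int) * 2 + 176
         else 3 * ((PySem.List.combinations (Lxy x y) 3).countP
                (fun m => decide (|det3x3A m| = |d|)) : Int)) := by
  simp only [solve]
  rw [vecA_eq]
  rw [foldl_if_add_three (fun mat => |det3x3A mat| = |d|)]
  have hperm : (2 : Int) ^ (3 * 3) - permutationA (2 ^ 3) 3 = 176 := by decide
  rw [hperm, zero_add]

-- ===== VERDICT (by name: the statement is the Claim_ definition above) =====
theorem solve_spec : Claim_equal_solve := by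
  intro x y d _
  unfold Spec_solve
  rw [solve_eq, solve_alt_eq_T3, mainT3]
  have hlen : ((Lxy x y).length : Int) = 8 := rfl
  by_cases hd : d = 0
  · subst hd
    rw [M3_eq_count_zero, hlen]
    simp only [ind, if_pos]
    push_cast
    ring
  · rw [M3_eq_count_ne d hd, hlen]
    simp only [ind, if_neg hd]
    push_cast
    ring
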